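-- pv_equiv track=rewrite | github.com/nekomiya-hinata/AiNiee | ModuleFolders/TextProcessor/TextProcessor.py | _restore_line_endings
-- ===== SOURCE A (Python) =====
-- from typing import List, Dict, Tuple, Any, Optional
--
-- def _restore_line_endings(text: str, line_endings: List[Tuple[int, str]]) -> str:
--     """根据记录的换行符信息还原原始格式"""
--     if not line_endings:
--         return text
--
--     lines = text.split('\n')
--     if len(lines) <= 1:
--         return text
--
--     # 重建文本，使用对应的原始换行符
--     result = []
--     for i, line in enumerate(lines[:-1]):  # 最后一行后面没有换行符
--         result.append(line)
--         if i < len(line_endings):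
--             result.append(line_endings[i][1])
--         else:
--             result.append('\n')  # 默认使用 \n
--
--     # 添加最后一行
--     if lines:
--         result.append(lines[-1])
--
--     return ''.join(result)
-- ===== SOURCE B (Python) =====
-- def _restore_line_endings(text, line_endings):
--     out = []
--     it = iter(line_endings)
--     for ch in text:
--         if ch == '\n':
--             e = next(it, None)
--             out.append('\n' if e is None else e[1])
--         else:
--             out.append(ch)
--     return ''.join(out)
-- ===== Notes on version B (the rewrite author's own statement) =====
-- stated objective: alternative
-- what changed: B makes a single character-level pass over the text, consuming the recorded endings with an iterator as each newline is met, instead of splitting into a list of lines and re-interleaving them by index.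
import Mathlib
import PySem

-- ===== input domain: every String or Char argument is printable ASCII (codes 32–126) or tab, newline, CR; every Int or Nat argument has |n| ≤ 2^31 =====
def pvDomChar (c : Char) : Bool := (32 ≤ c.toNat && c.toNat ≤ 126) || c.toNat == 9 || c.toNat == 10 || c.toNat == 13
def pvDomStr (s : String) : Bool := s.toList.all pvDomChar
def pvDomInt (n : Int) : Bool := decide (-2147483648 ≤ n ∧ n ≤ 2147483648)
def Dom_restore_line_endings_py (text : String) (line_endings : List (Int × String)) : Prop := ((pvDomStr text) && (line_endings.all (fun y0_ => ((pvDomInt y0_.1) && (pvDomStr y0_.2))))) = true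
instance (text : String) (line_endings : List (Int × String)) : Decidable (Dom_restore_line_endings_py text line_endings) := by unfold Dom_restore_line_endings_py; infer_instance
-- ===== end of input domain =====

-- B makes one character-level pass over the text, consuming the endings in order at each newline,
-- instead of A's split-into-lines-and-reindex approach; same result, similar cost.

-- ===== PORT A =====
def restore_line_endings_py (text : String) (line_endings : List (Int × String)) : String :=
  if line_endings = [] then text
  else
    let lines : List String := (PySem.Chars.splitOn text.toList ['\n']).map String.ofList
    if lines.length ≤ 1 then text
    else
      let result : List String :=
        (PySem.List.enumerate lines.dropLast).foldl
          (fun r p =>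
            (r ++ [p.2]) ++
              [if p.1 < (line_endings.length : Int) then
                  ((PySem.List.pyGet? line_endings p.1).getD (0, "\n")).2
                else "\n"]) []
      let result := if lines.isEmpty then result
        else result ++ [(PySem.List.pyGet? lines (-1)).getD ""]
      PySem.Str.join "" result

-- ===== PORT B =====
-- helper: the loop of Source B — walk the characters, consuming the endings iterator at each '\n'
def restoreAltGo : List Char → List (Int × String) → List String
  | [], _ => []
  | c :: cs, es =>
    if c = '\n' then
      match es with
      | [] => "\n" :: restoreAltGo cs []
      | e :: es' => e.2 :: restoreAltGo cs es'
    else String.ofList [c] :: restoreAltGo cs es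

def restore_line_endings_py_alt (text : String) (line_endings : List (Int × String)) : String :=
  PySem.Str.join "" (restoreAltGo text.toList line_endings)

-- ===== PRECONDITION & SPEC =====
def Spec_restore_line_endings_py (text : String) (line_endings : List (Int × String)) (out : String) : Prop := out = restore_line_endings_py_alt text line_endings
instance (text : String) (line_endings : List (Int × String)) (out : String) : Decidable (Spec_restore_line_endings_py text line_endings out) := by unfold Spec_restore_line_endings_py; infer_instance

-- ===== CLAIM (what is proved, stated in full; the proofs are below) =====
def Claim_equal_restore_line_endings_py : Prop := ∀ (text : String) (line_endings : List (Int × String)), Dom_restore_line_endings_py text line_endings → Spec_restore_line_endings_py text line_endings (restore_line_endings_py text line_endings)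

-- ===== LEMMAS AND PROOFS =====

-- the mathematical split of a character list on '\n'
def spN : List Char → List (List Char)
  | [] => [[]]
  | c :: cs => if c = '\n' then [] :: spN cs else (spN cs).modifyHead (c :: ·)

-- interleaving of lines with endings (consuming view), last line bare
def interN : List (List Char) → List (Int × String) → List Char
  | [], _ => []
  | [l], _ => l
  | l :: ls, [] => l ++ '\n' :: interN ls []
  | l :: ls, e :: es => l ++ e.2.toList ++ interN ls es

-- endings woven after EVERY line of the list (A applies this to lines[:-1])
def weaveN : List (List Char) → List (Int × String) → List Char
  | [], _ => []
  | l :: ls, [] => l ++ '\n' :: weaveN ls []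
  | l :: ls, e :: es => l ++ e.2.toList ++ weaveN ls es

-- what A's loop produces, indexed from s
def wIdx (es : List (Int × String)) : Nat → List String → List String
  | _, [] => []
  | s, l :: ls =>
      l :: (if (s : Int) < (es.length : Int) then
              ((PySem.List.pyGet? es (s : Int)).getD (0, "\n")).2
            else "\n") :: wIdx es (s + 1) ls

theorem spN_ne_nil (l : List Char) : spN l ≠ [] := by
  induction l with
  | nil => simp [spN]
  | cons c cs ih =>
    simp only [spN]
    split
    · simp
    · cases h : spN cs with
      | nil => exact absurd h ih
      | cons p ps => simp

theorem join_empty (xss : List (List Char)) : PySem.Chars.join [] xss = xss.flatten := by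
  induction xss with
  | nil => simp [PySem.Chars.join, List.intercalate]
  | cons x xs ih =>
    cases xs with
    | nil => simp [PySem.Chars.join, List.intercalate]
    | cons y ys =>
      simp only [PySem.Chars.join, List.intercalate, List.intersperse] at *
      simp_all

theorem map_dropLast' {α β : Type} (f : α → β) : ∀ (l : List α),
    (l.map f).dropLast = l.dropLast.map f := by
  intro l
  induction l with
  | nil => simp
  | cons a t ih => cases t <;> simp_all

theorem pyGet_neg_one {α : Type} (xs : List α) (h : xs ≠ []) :
    PySem.List.pyGet? xs (-1) = xs.getLast? := by
  have hlen : 0 < xs.length := List.length_pos_of_ne_nil h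
  have h1 : -((xs.length : Nat) : Int) ≤ -1 := by
    have : (1 : Int) ≤ (xs.length : Int) := by exact_mod_cast hlen
    omega
  simp [PySem.List.pyGet?, PySem.List.pyIdx?, h1, List.getLast?_eq_getElem?]

theorem splitOn_go_eq (fuel : Nat) : ∀ (l cur : List Char) (acc : List (List Char)),
    l.length < fuel →
    PySem.Chars.splitOn.go ['\n'] fuel l cur acc
      = acc.reverse ++ (spN l).modifyHead (cur.reverse ++ ·) := by
  induction fuel with
  | zero => intro l cur acc h; omega
  | succ n ih =>
    intro l cur acc h
    cases l with
    | nil => simp [PySem.Chars.splitOn.go, spN]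
    | cons c rest =>
      simp only [PySem.Chars.splitOn.go]
      by_cases hc : c = '\n'
      · subst hc
        have hpre : List.isPrefixOf ['\n'] ('\n' :: rest) = true := by
          simp [List.isPrefixOf]
        rw [if_pos hpre]
        have := ih rest [] ([].reverse ++ cur.reverse :: acc) (by simpa using Nat.lt_of_succ_lt_succ h)
        simp only [List.reverse_nil, List.nil_append] at this
        rw [show List.drop (['\n'] : List Char).length ('\n' :: rest) = rest by simp]
        rw [this]
        obtain ⟨p, ps, hps⟩ := List.exists_cons_of_ne_nil (spN_ne_nil rest)
        simp [spN, hps]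
      · have hpre : List.isPrefixOf ['\n'] (c :: rest) = false := by
          simp [List.isPrefixOf]
          intro h'; exact absurd h'.symm hc
        rw [if_neg (by simp [hpre])]
        rw [ih rest (c :: cur) acc (by simpa using Nat.lt_of_succ_lt_succ h)]
        obtain ⟨p, ps, hps⟩ := List.exists_cons_of_ne_nil (spN_ne_nil rest)
        simp [spN, hps, hc]

theorem splitOn_eq_spN (l : List Char) : PySem.Chars.splitOn l ['\n'] = spN l := by
  have h := splitOn_go_eq (l.length + 1) l [] [] (by omega)
  obtain ⟨p, ps, hps⟩ := List.exists_cons_of_ne_nil (spN_ne_nil l)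
  rw [PySem.Chars.splitOn, h, hps]
  simp [List.modifyHead]

theorem spN_singleton (l p : List Char) (h : spN l = [p]) : p = l := by
  induction l generalizing p with
  | nil =>
    simp [spN] at h
    simp [h]
  | cons c cs ih =>
    by_cases hc : c = '\n'
    · subst hc
      simp [spN] at h
      exact absurd h.2 (spN_ne_nil cs)
    · simp [spN, hc] at h
      obtain ⟨q, qs, hsp⟩ := List.exists_cons_of_ne_nil (spN_ne_nil cs)
      rw [hsp] at h
      simp [List.modifyHead] at h
      obtain ⟨h1, h2⟩ := h
      subst h2
      rw [← h1, ih q hsp]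

theorem toList_ofList' (l : List Char) : (String.ofList l).toList = l := by simp

theorem altGo_flatten (l : List Char) : ∀ es,
    ((restoreAltGo l es).map String.toList).flatten = interN (spN l) es := by
  induction l with
  | nil => intro es; simp [restoreAltGo, spN, interN]
  | cons c cs ih =>
    intro es
    obtain ⟨p, ps, hps⟩ := List.exists_cons_of_ne_nil (spN_ne_nil cs)
    by_cases hc : c = '\n'
    · subst hc
      have hsp : spN ('\n' :: cs) = [] :: spN cs := by simp [spN]
      cases es with
      | nil =>
        have h := ih []
        rw [hps] at h
        have hrec : restoreAltGo ('\n' :: cs) [] = "\n" :: restoreAltGo cs [] := by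
          simp [restoreAltGo]
        rw [hrec, List.map_cons, List.flatten_cons, h, hsp, hps,
          show ("\n" : String).toList = ['\n'] from rfl]
        cases ps <;> simp [interN]
      | cons e es' =>
        have h := ih es'
        rw [hps] at h
        have hrec : restoreAltGo ('\n' :: cs) (e :: es') = e.2 :: restoreAltGo cs es' := by
          simp [restoreAltGo]
        rw [hrec, List.map_cons, List.flatten_cons, h, hsp, hps]
        cases ps <;> simp [interN]
    · have h := ih es
      rw [hps] at h
      have hrec : restoreAltGo (c :: cs) es = String.ofList [c] :: restoreAltGo cs es := by
        simp [restoreAltGo, hc]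
      have hsp : spN (c :: cs) = (c :: p) :: ps := by
        simp [spN, hc, hps, List.modifyHead]
      rw [hrec, List.map_cons, List.flatten_cons, h, hsp, toList_ofList']
      cases ps <;> cases es <;> simp [interN]

theorem interN_nil_endings (l : List Char) : interN (spN l) [] = l := by
  induction l with
  | nil => simp [spN, interN]
  | cons c cs ih =>
    obtain ⟨p, ps, hps⟩ := List.exists_cons_of_ne_nil (spN_ne_nil cs)
    rw [hps] at ih
    by_cases hc : c = '\n'
    · subst hc
      simp only [spN, hps]
      cases ps <;> simp [interN] <;> simp [interN] at ih <;> simp [ih]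
    · simp only [spN, if_neg hc, hps, List.modifyHead]
      cases ps <;> simp [interN] at ih ⊢ <;> simp [ih]

theorem foldA_eq (es : List (Int × String)) :
    ∀ (ls : List String) (s : Nat) (acc : List String),
    (PySem.List.enumerate ls (s : Int)).foldl
        (fun r p =>
          (r ++ [p.2]) ++
            [if p.1 < (es.length : Int) then
                ((PySem.List.pyGet? es p.1).getD (0, "\n")).2
              else "\n"]) acc
      = acc ++ wIdx es s ls := by
  intro ls
  induction ls with
  | nil => intro s acc; simp [PySem.List.enumerate_nil, wIdx]
  | cons l ls ih =>
    intro s acc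
    rw [PySem.List.enumerate_cons, List.foldl_cons]
    have hcast : ((s : Int) + 1) = ((s + 1 : Nat) : Int) := by push_cast; ring
    rw [hcast, ih (s + 1)]
    simp [wIdx]

theorem wIdx_flatten (es : List (Int × String)) :
    ∀ (L : List (List Char)) (s : Nat),
    ((wIdx es s (L.map String.ofList)).map String.toList).flatten = weaveN L (es.drop s) := by
  intro L
  induction L with
  | nil => intro s; simp [wIdx, weaveN]
  | cons l ls ih =>
    intro s
    have h := ih (s + 1)
    by_cases hs : s < es.length
    · have hdrop : es.drop s = es[s] :: es.drop (s + 1) := List.drop_eq_getElem_cons hs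
      have hget : PySem.List.pyGet? es (s : Int) = some es[s] := by
        rw [PySem.List.pyGet?_natCast, List.getElem?_eq_getElem hs]
      have hlt : (s : Int) < (es.length : Int) := by exact_mod_cast hs
      simp only [List.map_cons, wIdx, if_pos hlt, hget, List.flatten_cons, h, hdrop, weaveN]
      simp
    · have hdrop : es.drop s = [] := List.drop_eq_nil_of_le (by omega)
      have hdrop1 : es.drop (s + 1) = [] := List.drop_eq_nil_of_le (by omega)
      have hlt : ¬ ((s : Int) < (es.length : Int)) := by exact_mod_cast hs
      rw [hdrop1] at h
      simp only [List.map_cons, wIdx, if_neg hlt, List.flatten_cons, h, hdrop, weaveN]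
      simp

theorem interN_eq_weave : ∀ (L : List (List Char)) (es : List (Int × String)),
    L ≠ [] → interN L es = weaveN L.dropLast es ++ L.getLastD [] := by
  intro L
  induction L with
  | nil => intro es h; exact absurd rfl h
  | cons l ls ih =>
    intro es _
    cases ls with
    | nil => cases es <;> simp [interN, weaveN]
    | cons m ms =>
      cases es with
      | nil => simp [interN, weaveN, ih [] (by simp)]
      | cons e es' => simp [interN, weaveN, ih es' (by simp)]

-- ===== VERDICT (by name: the statement is the Claim_ definition above) =====
theorem restore_line_endings_py_spec : Claim_equal_restore_line_endings_py := by
  intro text es _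
  unfold Spec_restore_line_endings_py
  apply String.toList_inj.mp
  have hB : (restore_line_endings_py_alt text es).toList = interN (spN text.toList) es := by
    simp [restore_line_endings_py_alt, PySem.Str.join, join_empty, altGo_flatten]
  rw [hB]
  obtain ⟨p, ps, hps⟩ := List.exists_cons_of_ne_nil (spN_ne_nil text.toList)
  by_cases hes : es = []
  · rw [hes, interN_nil_endings]
    simp [restore_line_endings_py]
  · unfold restore_line_endings_py
    rw [if_neg hes]
    simp only [splitOn_eq_spN]
    by_cases hlen : ((spN text.toList).map String.ofList).length ≤ 1
    · rw [if_pos hlen]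
      have hps' : ps = [] := by
        rw [hps] at hlen; simpa using hlen
      have hp : p = text.toList := spN_singleton _ _ (by rw [hps, hps'])
      rw [hps, hps', hp]
      simp [interN]
    · rw [if_neg hlen]
      have hIsE : ((spN text.toList).map String.ofList).isEmpty = false := by
        rw [hps]; simp
      obtain ⟨g, hg⟩ : ∃ g, (spN text.toList).getLast? = some g := by
        cases h' : (spN text.toList).getLast? with
        | none => rw [List.getLast?_eq_none_iff] at h'; exact absurd h' (spN_ne_nil _)
        | some g => exact ⟨g, rfl⟩
      have hlast : PySem.List.pyGet? ((spN text.toList).map String.ofList) (-1)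
          = some (String.ofList g) := by
        rw [pyGet_neg_one _ (by rw [hps]; simp), List.getLast?_map, hg]
        rfl
      rw [interN_eq_weave _ _ (spN_ne_nil _)]
      simp only [hIsE, Bool.false_eq_true, if_false, map_dropLast']
      have hfold := foldA_eq es ((spN text.toList).dropLast.map String.ofList) 0 []
      rw [Nat.cast_zero] at hfold
      rw [hfold, List.nil_append, hlast]
      simp only [Option.getD_some, PySem.Str.join,
        show ("" : String).toList = [] from rfl, join_empty, toList_ofList',
        List.map_append, List.flatten_append]
      rw [wIdx_flatten es ((spN text.toList).dropLast) 0, List.drop_zero]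
      simp [List.getLastD_eq_getLast?, hg]
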